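-- pv_equiv track=rewrite | github.com/zyang37/beyond_vector_search | utils/wiki_movie.py | parse_director
-- ===== SOURCE A (Python) =====
-- def parse_director(director_str):
--     directors = []
--     director_str = director_str.lower()
--     space_to = ""
--     director_str = director_str.replace("\n", "")
--     parse_by_comma = director_str.split(", ")
--     for i, a in enumerate(parse_by_comma):
--         # parse by 'and'
--         if "and" in a:
--             al = []
--             for v in a.split(" and "):
--                 tmp = v.replace(" ", space_to)
--                 if len(tmp) != 0:
--                     al.append(tmp)
--             a = al[:]
--
--         if type(a) is list:
--             directors.extend(a)
--         else:
--             if len(a.replace(" ", space_to)) != 0: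
--                 directors.append(a.replace(" ", space_to))
--     return directors
-- ===== SOURCE B (Python) =====
-- def parse_director(director_str):
--     s = director_str.lower().replace("\n", "")
--     # both delimiters collapse to a newline sentinel (impossible in s after the
--     # newline removal), so a single split tokenizes the whole string at once
--     canon = s.replace(", ", "\n").replace(" and ", "\n")
--     return [w for w in (t.replace(" ", "") for t in canon.split("\n")) if w]
-- ===== Notes on version B (the rewrite author's own statement) =====
-- stated objective: idiomatic
-- what changed: Replaces A's nested comma-split with a conditional and-split and per-branch append/extend logic by canonicalizing both delimiters to a newline sentinel (impossible after the newline removal) and doing one split plus one filtering comprehension.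
import Mathlib
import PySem

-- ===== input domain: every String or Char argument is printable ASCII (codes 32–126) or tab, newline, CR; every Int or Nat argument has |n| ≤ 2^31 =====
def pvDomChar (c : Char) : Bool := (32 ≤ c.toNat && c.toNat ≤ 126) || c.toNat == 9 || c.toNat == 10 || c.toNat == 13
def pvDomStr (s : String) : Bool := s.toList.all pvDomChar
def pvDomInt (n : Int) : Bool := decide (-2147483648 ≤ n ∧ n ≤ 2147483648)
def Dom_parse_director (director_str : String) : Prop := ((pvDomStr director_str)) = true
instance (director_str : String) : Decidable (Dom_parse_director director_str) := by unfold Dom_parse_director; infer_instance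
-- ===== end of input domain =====

-- B replaces A's nested comma-split / conditional and-split with per-branch append logic by
-- canonicalizing both delimiters to a newline sentinel (impossible after the newline removal)
-- followed by one split and one filtering pass; objective: more idiomatic, same result.

-- ===== PORT A =====
def parse_director (director_str : String) : List String :=
  let s0 := PySem.Chars.lower director_str.toList
  let s := PySem.Chars.replace s0 "\n".toList []
  let parse_by_comma := PySem.Chars.splitOn s ", ".toList
  let dirs := (PySem.List.enumerate parse_by_comma).foldl (fun directors ia =>
    let a := ia.2
    if PySem.Chars.isIn "and".toList a then
      let al := (PySem.Chars.splitOn a " and ".toList).foldl (fun al v =>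
        let tmp := PySem.Chars.replace v " ".toList []
        if tmp.length ≠ 0 then al ++ [tmp] else al) []
      directors ++ al
    else
      if (PySem.Chars.replace a " ".toList []).length ≠ 0 then
        directors ++ [PySem.Chars.replace a " ".toList []]
      else directors) []
  dirs.map String.ofList

-- ===== PORT B =====
def parse_director_alt (director_str : String) : List String :=
  let s0 := PySem.Chars.lower director_str.toList
  let s := PySem.Chars.replace s0 "\n".toList []
  let canon := PySem.Chars.replace (PySem.Chars.replace s ", ".toList "\n".toList)
      " and ".toList "\n".toList
  (((PySem.Chars.splitOn canon "\n".toList).map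
      (fun t => PySem.Chars.replace t " ".toList [])).filter (fun w => w ≠ [])).map String.ofList

-- ===== PRECONDITION & SPEC =====
def Spec_parse_director (director_str : String) (out : List String) : Prop := out = parse_director_alt director_str
instance (director_str : String) (out : List String) : Decidable (Spec_parse_director director_str out) := by unfold Spec_parse_director; infer_instance

-- ===== CLAIM (what is proved, stated in full; the proofs are below) =====
def Claim_equal_parse_director : Prop := ∀ (director_str : String), Dom_parse_director director_str → Spec_parse_director director_str (parse_director director_str)

-- ===== LEMMAS AND PROOFS =====
def splitF (sep : List Char) : Nat → List Char → List (List Char)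
  | _, [] => [[]]
  | 0, l => [l]
  | f+1, c :: t =>
    if sep.isPrefixOf (c :: t) then [] :: splitF sep f ((c :: t).drop sep.length)
    else ((splitF sep f t).modifyHead (c :: ·))

theorem go_split (sep : List Char) :
    ∀ (f : Nat) (l cur : List Char) (acc : List (List Char)),
      PySem.Chars.splitOn.go sep f l cur acc
        = acc.reverse ++ (splitF sep f l).modifyHead (cur.reverse ++ ·) := by
  intro f
  induction f with
  | zero =>
    intro l cur acc
    cases l <;> simp [PySem.Chars.splitOn.go, splitF]
  | succ f ih =>
    intro l cur acc
    cases l with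
    | nil => simp [PySem.Chars.splitOn.go, splitF]
    | cons c t =>
      rw [PySem.Chars.splitOn.go]
      split_ifs with h
      · simp [splitF, h, ih]
        cases splitF sep f (List.drop sep.length (c :: t)) <;> simp
      · simp [splitF, h, ih]
        cases hsf : splitF sep f t <;> simp [List.modifyHead]

def repF (old nw : List Char) : Nat → List Char → List Char
  | _, [] => []
  | 0, l => l
  | f+1, c :: t =>
    if old.isPrefixOf (c :: t) then nw ++ repF old nw f ((c :: t).drop old.length)
    else c :: repF old nw f t

theorem splitOn_eq (l sep : List Char) :
    PySem.Chars.splitOn l sep = splitF sep (l.length + 1) l := by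
  rw [PySem.Chars.splitOn, go_split]
  cases splitF sep (l.length + 1) l <;> simp

theorem go_rep (old nw : List Char) :
    ∀ (f : Nat) (l acc : List Char),
      PySem.Chars.replace.go old nw f l acc = acc.reverse ++ repF old nw f l := by
  intro f
  induction f with
  | zero =>
    intro l acc
    cases l <;> simp [PySem.Chars.replace.go, repF]
  | succ f ih =>
    intro l acc
    cases l with
    | nil => simp [PySem.Chars.replace.go, repF]
    | cons c t =>
      rw [PySem.Chars.replace.go]
      split_ifs with h
      · simp [repF, h, ih]
      · simp [repF, h, ih]

theorem replace_eq (l old nw : List Char) (h : old ≠ []) :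
    PySem.Chars.replace l old nw = repF old nw l.length l := by
  rw [PySem.Chars.replace]
  simp [List.isEmpty_iff, h, go_rep]

theorem splitF_ne_nil (sep : List Char) : ∀ (f : Nat) (l : List Char), splitF sep f l ≠ [] := by
  intro f
  induction f with
  | zero => intro l; cases l <;> simp [splitF]
  | succ f ih =>
    intro l
    cases l with
    | nil => simp [splitF]
    | cons c t =>
      rw [splitF]
      split_ifs with h
      · simp
      · cases hsf : splitF sep f t with
        | nil => exact absurd hsf (ih t)
        | cons a b => simp

theorem splitF_fuel (sep : List Char) (hsep : sep ≠ []) :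
    ∀ (f g : Nat) (l : List Char), l.length ≤ f → l.length ≤ g →
      splitF sep f l = splitF sep g l := by
  intro f
  induction f with
  | zero =>
    intro g l hf hg
    have : l = [] := by cases l <;> simp_all
    subst this; cases g <;> simp [splitF]
  | succ f ih =>
    intro g l hf hg
    cases l with
    | nil => cases g <;> simp [splitF]
    | cons c t =>
      cases g with
      | zero => simp at hg
      | succ g =>
        rw [splitF, splitF]
        have hsl : 1 ≤ sep.length := by cases sep <;> simp_all
        simp only [List.length_cons] at hf hg
        split_ifs with h
        · have hdl : (List.drop sep.length (c :: t)).length ≤ f := by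
            simp only [List.length_drop, List.length_cons]; omega
          have hdg : (List.drop sep.length (c :: t)).length ≤ g := by
            simp only [List.length_drop, List.length_cons]; omega
          rw [ih g _ hdl hdg]
        · have ht : t.length ≤ f := by omega
          have htg : t.length ≤ g := by omega
          rw [ih g t ht htg]

theorem repF_fuel (old nw : List Char) (hold : old ≠ []) :
    ∀ (f g : Nat) (l : List Char), l.length ≤ f → l.length ≤ g →
      repF old nw f l = repF old nw g l := by
  intro f
  induction f with
  | zero =>
    intro g l hf hg
    have : l = [] := by cases l <;> simp_all
    subst this; cases g <;> simp [repF]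
  | succ f ih =>
    intro g l hf hg
    cases l with
    | nil => cases g <;> simp [repF]
    | cons c t =>
      cases g with
      | zero => simp at hg
      | succ g =>
        rw [repF, repF]
        have hsl : 1 ≤ old.length := by cases old <;> simp_all
        simp only [List.length_cons] at hf hg
        split_ifs with h
        · have hdl : (List.drop old.length (c :: t)).length ≤ f := by
            simp only [List.length_drop, List.length_cons]; omega
          have hdg : (List.drop old.length (c :: t)).length ≤ g := by
            simp only [List.length_drop, List.length_cons]; omega
          rw [ih g _ hdl hdg]
        · have ht : t.length ≤ f := by omega
          have htg : t.length ≤ g := by omega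
          rw [ih g t ht htg]

theorem intercalate_singleton' {α : Type} (sep x : List α) :
    List.intercalate sep [x] = x := by
  simp [List.intercalate, List.intersperse]

theorem intercalate_cons_ne {α : Type} (sep x : List α) (xs : List (List α)) (h : xs ≠ []) :
    List.intercalate sep (x :: xs) = x ++ sep ++ List.intercalate sep xs := by
  cases xs with
  | nil => simp_all
  | cons y ys => simp [List.intercalate, List.intersperse]

theorem repF_intercalate (old nw : List Char) :
    ∀ (f : Nat) (l : List Char), repF old nw f l = List.intercalate nw (splitF old f l) := by
  intro f
  induction f with
  | zero => intro l; cases l <;> simp [repF, splitF, intercalate_singleton']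
  | succ f ih =>
    intro l
    cases l with
    | nil => simp [repF, splitF, intercalate_singleton']
    | cons c t =>
      rw [repF, splitF]
      split_ifs with h
      · rw [ih, intercalate_cons_ne _ _ _ (splitF_ne_nil old f _)]
        simp
      · rw [ih]
        cases hsf : splitF old f t with
        | nil => exact absurd hsf (splitF_ne_nil old f t)
        | cons a b =>
          cases b with
          | nil => simp [intercalate_singleton']
          | cons b bs =>
            simp [List.modifyHead, intercalate_cons_ne _ _ _ (by simp : (b :: bs : List (List Char)) ≠ [])]

theorem mem_splitF_subset (sep : List Char) :
    ∀ (f : Nat) (l p : List Char), p ∈ splitF sep f l → ∀ c ∈ p, c ∈ l := by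
  intro f
  induction f with
  | zero =>
    intro l p hp c hc
    cases l <;> simp [splitF] at hp <;> subst hp <;> simp_all
  | succ f ih =>
    intro l p hp c hc
    cases l with
    | nil => simp [splitF] at hp; subst hp; simp_all
    | cons a t =>
      rw [splitF] at hp
      split_ifs at hp with h
      · rcases List.mem_cons.mp hp with h1 | h1
        · subst h1; simp_all
        · exact List.drop_subset _ _ (ih _ p h1 c hc)
      · cases hsf : splitF sep f t with
        | nil => exact absurd hsf (splitF_ne_nil sep f t)
        | cons q qs =>
          rw [hsf] at hp
          simp [List.modifyHead] at hp
          rcases hp with h1 | h1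
          · subst h1
            rcases List.mem_cons.mp hc with h2 | h2
            · simp [h2]
            · exact List.mem_cons_of_mem a (ih t q (by simp [hsf]) c h2)
          · exact List.mem_cons_of_mem a (ih t p (by simp [hsf, h1]) c hc)

theorem splitF_no_infix (sep : List Char) :
    ∀ (f : Nat) (l : List Char), ¬ (sep <:+: l) → splitF sep f l = [l] := by
  intro f
  induction f with
  | zero => intro l h; cases l <;> simp [splitF]
  | succ f ih =>
    intro l h
    cases l with
    | nil => simp [splitF]
    | cons c t =>
      rw [splitF]
      split_ifs with hp
      · exact absurd (List.IsPrefix.isInfix (List.isPrefixOf_iff_prefix.mp hp)) h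
      · have : ¬ (sep <:+: t) := fun hi => h (List.infix_cons hi)
        rw [ih t this]
        simp [List.modifyHead]

theorem repF_single_free (d : Char) :
    ∀ (f : Nat) (l : List Char), l.length ≤ f → d ∉ repF [d] [] f l := by
  intro f
  induction f with
  | zero =>
    intro l hf
    have : l = [] := by cases l <;> simp_all
    subst this; simp [repF]
  | succ f ih =>
    intro l hf
    cases l with
    | nil => simp [repF]
    | cons c t =>
      simp only [List.length_cons] at hf
      rw [repF]
      split_ifs with h
      · have hd : List.drop 1 (c :: t) = t := by simp
        simp only [List.isPrefixOf_iff_prefix] at h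
        simp only [List.length_singleton, hd, List.nil_append]
        exact ih t (by omega)
      · have hcd : c ≠ d := by
          intro he; subst he
          exact h (List.isPrefixOf_iff_prefix.mpr (by simp))
        simp only [List.mem_cons]
        rintro (h1 | h1)
        · exact hcd h1.symm
        · exact ih t (by omega) h1

theorem splitOn_cons (sep : List Char) (hsep : sep ≠ []) (c : Char) (t : List Char) :
    PySem.Chars.splitOn (c :: t) sep
      = if sep.isPrefixOf (c :: t) then [] :: PySem.Chars.splitOn ((c :: t).drop sep.length) sep
        else (PySem.Chars.splitOn t sep).modifyHead (c :: ·) := by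
  rw [splitOn_eq, splitOn_eq, splitOn_eq, splitF]
  have hsl : 1 ≤ sep.length := by cases sep <;> simp_all
  split_ifs with h
  · rw [splitF_fuel sep hsep ((c :: t).length) ((List.drop sep.length (c :: t)).length + 1)
      (List.drop sep.length (c :: t)) (by simp only [List.length_drop, List.length_cons]; omega)
      (by omega)]
  · simp only [List.length_cons]

theorem splitOn_ne_nil (l sep : List Char) : PySem.Chars.splitOn l sep ≠ [] := by
  rw [splitOn_eq]; exact splitF_ne_nil sep _ l

theorem splitOn_no_infix (l sep : List Char) (h : ¬ (sep <:+: l)) :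
    PySem.Chars.splitOn l sep = [l] := by
  rw [splitOn_eq]; exact splitF_no_infix sep _ l h

theorem splitOn_prepend (d : Char) (q r : List Char) (hq : d ∉ q) :
    PySem.Chars.splitOn (q ++ d :: r) [d] = q :: PySem.Chars.splitOn r [d] := by
  induction q with
  | nil =>
    rw [List.nil_append, splitOn_cons [d] (by simp) d r]
    simp
  | cons c q ih =>
    have hcd : c ≠ d := by simp at hq; tauto
    have hq' : d ∉ q := by simp at hq; tauto
    rw [List.cons_append, splitOn_cons [d] (by simp) c (q ++ d :: r)]
    have hnp : ¬ ([d].isPrefixOf (c :: (q ++ d :: r)) = true) := by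
      simp [List.isPrefixOf_iff_prefix]
      intro he; exact absurd he.symm hcd
    simp only [hnp, if_false, Bool.false_eq_true]
    rw [ih hq']
    simp [List.modifyHead]

theorem splitOn_intercalate (d : Char) (qs : List (List Char)) (hne : qs ≠ [])
    (hfree : ∀ q ∈ qs, d ∉ q) :
    PySem.Chars.splitOn (List.intercalate [d] qs) [d] = qs := by
  induction qs with
  | nil => simp_all
  | cons q qs ih =>
    cases qs with
    | nil =>
      rw [intercalate_singleton']
      rw [splitOn_no_infix _ _ (by
        rw [List.singleton_infix_iff]
        exact hfree q (by simp))]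
    | cons q' qs' =>
      rw [intercalate_cons_ne _ _ _ (by simp)]
      rw [List.append_assoc]
      have : ([d] ++ List.intercalate [d] (q' :: qs') : List Char)
          = d :: List.intercalate [d] (q' :: qs') := by simp
      rw [this, splitOn_prepend d q _ (hfree q (by simp))]
      rw [ih (by simp) (fun x hx => hfree x (by simp [hx]))]

theorem replace_intercalate (l old nw : List Char) (hold : old ≠ []) :
    PySem.Chars.replace l old nw = List.intercalate nw (PySem.Chars.splitOn l old) := by
  rw [replace_eq l old nw hold, repF_intercalate, splitOn_eq]
  rw [splitF_fuel old hold l.length (l.length + 1) l (le_refl _) (by omega)]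

theorem replace_nil (old nw : List Char) (hold : old ≠ []) :
    PySem.Chars.replace [] old nw = [] := by
  rw [replace_eq [] old nw hold]; simp [repF]

theorem replace_cons (old nw : List Char) (hold : old ≠ []) (c : Char) (t : List Char) :
    PySem.Chars.replace (c :: t) old nw
      = if old.isPrefixOf (c :: t) then nw ++ PySem.Chars.replace ((c :: t).drop old.length) old nw
        else c :: PySem.Chars.replace t old nw := by
  rw [replace_eq (c :: t) old nw hold, replace_eq _ old nw hold, replace_eq t old nw hold]
  rw [List.length_cons, repF]
  have hsl : 1 ≤ old.length := by cases old <;> simp_all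
  split_ifs with h
  · rw [repF_fuel old nw hold t.length ((List.drop old.length (c :: t)).length)
      (List.drop old.length (c :: t)) (by simp only [List.length_drop, List.length_cons]; omega)
      (le_refl _)]
  · rfl

theorem prefix_append_cons_iff (d : Char) (old xs ys : List Char) (hd : d ∉ old) :
    old <+: (xs ++ d :: ys) ↔ old <+: xs := by
  constructor
  · intro h
    by_cases hlen : old.length ≤ xs.length
    · have h1 : old = (xs ++ d :: ys).take old.length := (List.prefix_iff_eq_take.mp h)
      rw [List.take_append_of_le_length hlen] at h1
      rw [h1]; exact List.take_prefix _ _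
    · exfalso
      have h1 : (xs ++ [d]) <+: (xs ++ d :: ys) := by
        refine ⟨ys, by simp⟩
      have h2 : (xs ++ [d]) <+: old :=
        List.prefix_of_prefix_length_le h1 h (by simp; omega)
      exact hd (h2.subset (by simp))
  · intro h
    exact h.trans ⟨d :: ys, rfl⟩

theorem replace_split_at (d : Char) (old nw : List Char) (hold : old ≠ []) (hd : d ∉ old) :
    ∀ (xs ys : List Char),
      PySem.Chars.replace (xs ++ d :: ys) old nw
        = PySem.Chars.replace xs old nw ++ d :: PySem.Chars.replace ys old nw := by
  suffices H : ∀ (n : Nat) (xs ys : List Char), xs.length = n →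
      PySem.Chars.replace (xs ++ d :: ys) old nw
        = PySem.Chars.replace xs old nw ++ d :: PySem.Chars.replace ys old nw by
    exact fun xs ys => H xs.length xs ys rfl
  intro n
  induction n using Nat.strong_induction_on with
  | _ n ih =>
    intro xs ys hlen
    cases xs with
    | nil =>
      rw [List.nil_append, replace_nil old nw hold, List.nil_append]
      rw [replace_cons old nw hold d ys]
      have : ¬ (old.isPrefixOf (d :: ys) = true) := by
        rw [List.isPrefixOf_iff_prefix]
        intro hp
        cases old with
        | nil => exact hold rfl
        | cons o os =>
          have : o = d := by
            have := List.prefix_iff_eq_take.mp hp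
            simp at this; tauto
          subst this; simp at hd
      simp [this]
    | cons c xs' =>
      have hpfx : old.isPrefixOf (c :: xs' ++ d :: ys) = old.isPrefixOf (c :: xs') := by
        have hiff := prefix_append_cons_iff d old (c :: xs') ys hd
        rw [List.cons_append] at hiff
        rw [Bool.eq_iff_iff, List.isPrefixOf_iff_prefix, List.isPrefixOf_iff_prefix]
        exact hiff
      rw [List.cons_append, replace_cons old nw hold c (xs' ++ d :: ys),
        replace_cons old nw hold c xs', ← List.cons_append, hpfx]
      have hol : 1 ≤ old.length := by cases old <;> simp_all
      split_ifs with h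
      · have hl : old.length ≤ (c :: xs').length := by
          have := (List.isPrefixOf_iff_prefix.mp h).length_le
          simpa using this
        rw [List.drop_append_of_le_length hl]
        rw [ih ((c :: xs').drop old.length).length
          (by
            rw [List.length_drop]
            simp only [List.length_cons] at hlen ⊢
            omega) _ ys rfl]
        simp
      · rw [ih xs'.length (by simp [← hlen]) xs' ys rfl]
        simp

theorem replace_intercalate_map (d : Char) (old nw : List Char) (hold : old ≠ []) (hd : d ∉ old) :
    ∀ (qs : List (List Char)), qs ≠ [] →
      PySem.Chars.replace (List.intercalate [d] qs) old nw
        = List.intercalate [d] (qs.map (fun q => PySem.Chars.replace q old nw)) := by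
  intro qs
  induction qs with
  | nil => simp
  | cons q qs ih =>
    intro _
    cases qs with
    | nil => simp [intercalate_singleton']
    | cons q' qs' =>
      calc PySem.Chars.replace (List.intercalate [d] (q :: q' :: qs')) old nw
          = PySem.Chars.replace (q ++ d :: List.intercalate [d] (q' :: qs')) old nw := by
            rw [intercalate_cons_ne _ _ _ (by simp)]; simp
        _ = PySem.Chars.replace q old nw
              ++ d :: PySem.Chars.replace (List.intercalate [d] (q' :: qs')) old nw :=
            replace_split_at d old nw hold hd _ _
        _ = PySem.Chars.replace q old nw
              ++ d :: List.intercalate [d]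
                  (List.map (fun q => PySem.Chars.replace q old nw) (q' :: qs')) := by
            rw [ih (by simp)]
        _ = List.intercalate [d] (List.map (fun q => PySem.Chars.replace q old nw) (q :: q' :: qs')) := by
            show _ = List.intercalate [d] (PySem.Chars.replace q old nw
              :: List.map (fun q => PySem.Chars.replace q old nw) (q' :: qs'))
            rw [intercalate_cons_ne _ _ _ (by simp)]
            simp

theorem intercalate_append_ne {α : Type} (sep : List α) (xs ys : List (List α))
    (hx : xs ≠ []) (hy : ys ≠ []) :
    List.intercalate sep (xs ++ ys)
      = List.intercalate sep xs ++ sep ++ List.intercalate sep ys := by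
  induction xs with
  | nil => simp_all
  | cons x xs ih =>
    cases xs with
    | nil =>
      rw [intercalate_singleton', List.singleton_append,
        intercalate_cons_ne _ _ _ hy]
    | cons x' xs' =>
      rw [List.cons_append, intercalate_cons_ne _ _ _ (by simp),
        intercalate_cons_ne _ _ _ (by simp), ih (by simp)]
      simp

theorem intercalate_flatMap (d : Char) (P : List (List Char)) (Q : List Char → List (List Char))
    (hQ : ∀ p, Q p ≠ []) :
    List.intercalate [d] (P.map (fun p => List.intercalate [d] (Q p)))
      = List.intercalate [d] (P.flatMap Q) := by
  induction P with
  | nil => simp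
  | cons p P ih =>
    cases P with
    | nil => simp [intercalate_singleton']
    | cons p' P' =>
      rw [List.map_cons, intercalate_cons_ne _ _ _ (by simp), List.flatMap_cons,
        intercalate_append_ne [d] (Q p) _ (hQ p)
          (by
            simp only [List.flatMap_cons]
            intro h
            exact (hQ p') (List.append_eq_nil_iff.mp h).1),
        ih]

theorem enumerate_foldl {α β : Type} (g : β → α → β) :
    ∀ (l : List α) (k : Int) (init : β),
      (PySem.List.enumerate l k).foldl (fun acc p => g acc p.2) init = l.foldl g init := by
  intro l
  induction l with
  | nil => intro k init; simp [PySem.List.enumerate]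
  | cons x t ih => intro k init; simp [PySem.List.enumerate, ih]

theorem newline_free (l : List Char) : '\n' ∉ PySem.Chars.replace l "\n".toList [] := by
  have : ("\n".toList : List Char) = ['\n'] := by decide
  rw [this, replace_eq l ['\n'] [] (by simp)]
  exact repF_single_free '\n' l.length l (le_refl _)

theorem splitOn_subset (l sep p : List Char) (hp : p ∈ PySem.Chars.splitOn l sep) :
    ∀ c ∈ p, c ∈ l := by
  rw [splitOn_eq] at hp
  exact mem_splitF_subset sep _ l p hp

theorem flatMap_ne_nil' {α β : Type} (P : List α) (Q : α → List β) (hP : P ≠ [])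
    (hQ : ∀ p, Q p ≠ []) : P.flatMap Q ≠ [] := by
  cases P with
  | nil => exact absurd rfl hP
  | cons p P =>
    simp only [List.flatMap_cons]
    intro h
    exact hQ p (List.append_eq_nil_iff.mp h).1

theorem tokens_eq (s : List Char) (hs : '\n' ∉ s) :
    PySem.Chars.splitOn
        (PySem.Chars.replace (PySem.Chars.replace s ", ".toList "\n".toList)
          " and ".toList "\n".toList) "\n".toList
      = (PySem.Chars.splitOn s ", ".toList).flatMap
          (fun a => PySem.Chars.splitOn a " and ".toList) := by
  have hnl : ("\n".toList : List Char) = ['\n'] := by decide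
  rw [hnl]
  set P := PySem.Chars.splitOn s ", ".toList with hP
  have hPne : P ≠ [] := splitOn_ne_nil s _
  have hPfree : ∀ q ∈ P, '\n' ∉ q := fun q hq hdq => hs (splitOn_subset s _ q hq _ hdq)
  rw [replace_intercalate s ", ".toList ['\n'] (by decide), ← hP]
  rw [replace_intercalate_map '\n' " and ".toList ['\n'] (by decide) (by decide) P hPne]
  have hmap : P.map (fun q => PySem.Chars.replace q " and ".toList ['\n'])
      = P.map (fun q => List.intercalate ['\n'] (PySem.Chars.splitOn q " and ".toList)) := by
    exact List.map_congr_left (fun q _ => replace_intercalate q " and ".toList ['\n'] (by decide))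
  rw [hmap, intercalate_flatMap '\n' P _ (fun p => splitOn_ne_nil p _)]
  rw [splitOn_intercalate '\n' _ (flatMap_ne_nil' P _ hPne (fun p => splitOn_ne_nil p _))]
  intro q' hq'
  rcases List.mem_flatMap.mp hq' with ⟨q, hqP, hq'q⟩
  intro hdq
  exact hPfree q hqP (splitOn_subset q _ q' hq'q _ hdq)

theorem parse_director_agrees (director_str : String) :
    parse_director director_str = parse_director_alt director_str := by
  unfold parse_director parse_director_alt
  simp only []
  set s := PySem.Chars.replace (PySem.Chars.lower director_str.toList) "\n".toList [] with hsdef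
  have hs : '\n' ∉ s := newline_free _
  rw [tokens_eq s hs]
  set rep := fun v => PySem.Chars.replace v " ".toList [] with hrep
  set P := PySem.Chars.splitOn s ", ".toList with hP
  -- outer loop over enumerate
  rw [enumerate_foldl (g := fun directors a =>
    if PySem.Chars.isIn "and".toList a then
      directors ++ (PySem.Chars.splitOn a " and ".toList).foldl (fun al v =>
        if (rep v).length ≠ 0 then al ++ [rep v] else al) []
    else
      if (rep a).length ≠ 0 then directors ++ [rep a] else directors) P 0 []]
  have hbody : (fun (directors : List (List Char)) a =>
      if PySem.Chars.isIn "and".toList a then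
        directors ++ (PySem.Chars.splitOn a " and ".toList).foldl (fun al v =>
          if (rep v).length ≠ 0 then al ++ [rep v] else al) []
      else
        if (rep a).length ≠ 0 then directors ++ [rep a] else directors)
      = (fun directors a => directors ++
          (if PySem.Chars.isIn "and".toList a then
            (PySem.Chars.splitOn a " and ".toList).foldl (fun al v =>
              if (rep v).length ≠ 0 then al ++ [rep v] else al) []
          else
            if (rep a).length ≠ 0 then [rep a] else [])) := by
    funext directors a
    split_ifs <;> simp
  rw [hbody, PySem.List.foldl_append_eq_flatMap]
  rw [List.filter_map, List.filter_flatMap, List.map_flatMap]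
  rw [List.nil_append]
  refine congrArg _ (congrFun (congrArg List.flatMap (funext fun a => ?_)) P)
  have hinner : (PySem.Chars.splitOn a " and ".toList).foldl (fun al v =>
      if (rep v).length ≠ 0 then al ++ [rep v] else al) []
      = ((PySem.Chars.splitOn a " and ".toList).filter
          (fun v => decide ((rep v).length ≠ 0))).map rep := by
    rw [PySem.List.foldl_append_ite (p := fun v => (rep v).length ≠ 0) (f := rep)]
    simp
  have hfc : ∀ (l : List (List Char)),
      l.filter (fun v => decide ((rep v).length ≠ 0))
        = l.filter (fun x => (fun w => decide (w ≠ [])) (rep x)) := by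
    intro l
    refine List.filter_congr (fun v _ => ?_)
    by_cases h : rep v = [] <;> simp [h]
  by_cases hin : PySem.Chars.isIn "and".toList a = true
  · simp only [hin, if_true, hinner]
    rw [hfc]
    rfl
  · have hnin : PySem.Chars.isIn "and".toList a = false := by
      cases h : PySem.Chars.isIn "and".toList a
      · rfl
      · exact absurd h hin
    have hno : ¬ (" and ".toList <:+: a) := by
      intro h
      have hand : ("and".toList : List Char) <:+: " and ".toList := by decide
      exact ((PySem.Chars.isIn_eq_false_iff _ _).mp hnin) (hand.trans h)
    rw [splitOn_no_infix a _ hno]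
    simp only [hnin, Bool.false_eq_true, if_false]
    by_cases h : (rep a).length ≠ 0
    · have hne : rep a ≠ [] := by
        intro he; rw [he] at h; exact h rfl
      simp [h, Function.comp, hne]
    · have he : rep a = [] := by
        rcases List.eq_nil_or_concat (rep a) with h1 | ⟨l, e, h1⟩
        · exact h1
        · exfalso; apply h; rw [h1]; simp
      simp [Function.comp, he]

-- ===== VERDICT (by name: the statement is the Claim_ definition above) =====
theorem parse_director_spec : Claim_equal_parse_director := by
  intro director_str _
  unfold Spec_parse_director
  exact parse_director_agrees director_str
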